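-- pv_equiv track=rewrite | github.com/yu2799/AtCoder | abc/200/200/198E.py | dfs
-- ===== SOURCE A (Python) =====
-- from collections import deque, defaultdict
--
-- def dfs(graph, n, c):
--     res = []
--     d = defaultdict(int)
--     visited = set()
--     next_visit = deque([(0, -1)])
--     while next_visit:
--         cur, parent = next_visit.pop()
--         if cur not in visited:
--             next_visit.append((cur, parent))
--             visited.add(cur)
--             if d[c[cur]] == 0:
--                 res.append(cur + 1)
--             d[c[cur]] = d[c[cur]] + 1
--             for i in graph[cur]:
--                 if i != parent:
--                     next_visit.append((i, cur))
--         else: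
--             d[c[cur]] = d[c[cur]] - 1
--     res.sort()
--     return res
-- ===== SOURCE B (Python) =====
-- def dfs(graph, n, c):
--     res = []
--     stack = [(0, -1, frozenset())]
--     while stack:
--         cur, parent, above = stack.pop()
--         col = c[cur]
--         if col not in above:
--             res.append(cur + 1)
--             below = above | {col}
--         else:
--             below = above
--         for i in graph[cur]:
--             if i != parent:
--                 stack.append((i, cur, below))
--     res.sort()
--     return res
-- ===== Notes on version B (the rewrite author's own statement) =====
-- stated objective: alternative
-- what changed: Replaces the visited-set/defaultdict-counter DFS (marker re-push entries whose second pop undoes the counter increment) by a stack DFS whose entries carry the immutable set of colors on the root path, so B needs no visited set, no counter and no undo pass; …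
-- outside the precondition, e.g. on dfs({0: [1, 2, 0], 1: [0], 2: [0]}, 3, [0, 1, 0]): A returns [1, 2, 3], B returns [1, 2, 2]
import Mathlib
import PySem

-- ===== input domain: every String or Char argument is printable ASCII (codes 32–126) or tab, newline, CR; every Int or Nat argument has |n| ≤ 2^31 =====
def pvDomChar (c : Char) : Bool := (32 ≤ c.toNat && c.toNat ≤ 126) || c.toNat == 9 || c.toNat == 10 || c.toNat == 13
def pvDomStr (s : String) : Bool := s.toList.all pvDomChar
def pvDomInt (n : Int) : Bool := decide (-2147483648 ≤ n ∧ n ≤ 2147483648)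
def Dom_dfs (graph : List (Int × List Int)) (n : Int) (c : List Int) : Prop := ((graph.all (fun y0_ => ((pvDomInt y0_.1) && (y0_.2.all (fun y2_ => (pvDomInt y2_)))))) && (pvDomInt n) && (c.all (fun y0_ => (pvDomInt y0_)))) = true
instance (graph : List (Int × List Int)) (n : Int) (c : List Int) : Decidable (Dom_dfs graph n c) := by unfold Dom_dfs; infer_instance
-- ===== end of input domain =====

-- B replaces A's visited-set + defaultdict counter with undo-markers by a stack DFS whose
-- entries carry the set of colors on the root path; alternative decomposition, not claimed faster.

-- termination helpers for the port of A (cited by name in decreasing_by)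
theorem pvContainsFalse (s : PySem.Set Int) (x : Int) : s.contains x = false ↔ x ∉ s := by
  rw [← PySem.Set.contains_iff s x]
  cases s.contains x <;> simp

theorem pvFilterLe (p q : Int → Bool) (h : ∀ x, p x = true → q x = true) :
    ∀ t : List Int, (t.filter p).length ≤ (t.filter q).length := by
  intro t
  induction t with
  | nil => simp
  | cons a t ih =>
    simp only [List.filter_cons]
    cases hp : p a with
    | true => rw [h a hp]; simpa using ih
    | false => cases q a <;> simp <;> omega

theorem pvFilterVisLt (l : List Int) (vis : PySem.Set Int) (cur : Int)
    (h1 : cur ∈ l) (h2 : PySem.Set.contains vis cur = false) :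
    (l.filter (fun k => !(PySem.Set.contains (PySem.Set.add vis cur) k))).length <
      (l.filter (fun k => !(PySem.Set.contains vis k))).length := by
  have himp : ∀ x, (!(PySem.Set.contains (PySem.Set.add vis cur) x)) = true →
      (!(PySem.Set.contains vis x)) = true := by
    intro x hx
    simp only [Bool.not_eq_true'] at hx ⊢
    rw [pvContainsFalse] at hx ⊢
    intro hm
    exact hx ((PySem.Set.mem_add vis cur x).mpr (Or.inl hm))
  have hnew : (!(PySem.Set.contains (PySem.Set.add vis cur) cur)) = false := by
    have hmem : cur ∈ PySem.Set.add vis cur := (PySem.Set.mem_add vis cur cur).mpr (Or.inr rfl)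
    rw [(PySem.Set.contains_iff (PySem.Set.add vis cur) cur).mpr hmem]
    rfl
  have hold : (!(PySem.Set.contains vis cur)) = true := by rw [h2]; rfl
  induction l with
  | nil => simp at h1
  | cons a t ih =>
    by_cases hac : a = cur
    · subst hac
      rw [List.filter_cons, List.filter_cons, hnew, hold]
      simp only [Bool.false_eq_true, if_false, if_pos trivial, List.length_cons]
      have := pvFilterLe _ _ himp t
      omega
    · have h1' : cur ∈ t := by
        rcases List.mem_cons.mp h1 with h | h
        · exact absurd h.symm hac
        · exact h
      have heq : (PySem.Set.contains (PySem.Set.add vis cur) a) = (PySem.Set.contains vis a) := by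
        cases hcv : PySem.Set.contains vis a with
        | true =>
          have ha : a ∈ vis := (PySem.Set.contains_iff vis a).mp hcv
          exact (PySem.Set.contains_iff _ a).mpr ((PySem.Set.mem_add vis cur a).mpr (Or.inl ha))
        | false =>
          rw [pvContainsFalse] at hcv ⊢
          intro hm
          rcases (PySem.Set.mem_add vis cur a).mp hm with h | h
          · exact hcv h
          · exact hac h
      simp only [List.filter_cons, heq]
      cases PySem.Set.contains vis a with
      | true => simpa using ih h1'
      | false => simpa using Nat.succ_lt_succ (ih h1')

-- ===== PORT A =====
def dfsLoop (graph : List (Int × List Int)) (c : List Int)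
    (stk : List (Int × Int)) (vis : PySem.Set Int) (d : PySem.Dict Int Int)
    (res : List Int) : List Int :=
  match stk with
  | [] => res
  | (cur, parent) :: stk' =>
    if hv : PySem.Set.contains vis cur = true then
      -- revisited entry: d[c[cur]] -= 1
      match PySem.List.pyGet? c cur with
      | none => res
      | some col => dfsLoop graph c stk' vis (d.insert col (d.getD col 0 - 1)) res
    else
      -- first visit: re-push as marker, mark visited, count colour, push children
      match hg : PySem.Dict.get? (PySem.Dict.mk graph) cur, PySem.List.pyGet? c cur with
      | some nbrs, some col =>
        dfsLoop graph c
          (nbrs.foldl (fun s i => if i ≠ parent then (i, cur) :: s else s) ((cur, parent) :: stk'))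
          (PySem.Set.add vis cur)
          (d.insert col (d.getD col 0 + 1))
          (if d.getD col 0 = 0 then res ++ [cur + 1] else res)
      | none, _ => res
      | some _, none => res
termination_by
  (((graph.map Prod.fst).filter (fun k => !(PySem.Set.contains vis k))).length, stk.length)
decreasing_by
  · apply Prod.Lex.right
    simp
  · apply Prod.Lex.left
    apply pvFilterVisLt
    · have hmem := PySem.Dict.mem_keys_of_mem_items _ (PySem.Dict.mem_items_of_get?_eq_some _ hg)
      simpa [PySem.Dict.keys] using hmem
    · simpa using hv

def dfs (graph : List (Int × List Int)) (n : Int) (c : List Int) : List Int :=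
  PySem.List.sorted (dfsLoop graph c [((0 : Int), (-1 : Int))] PySem.Set.empty PySem.Dict.empty [])
    (fun x => x) false

-- ===== PORT B =====
def dfsAltLoop (graph : List (Int × List Int)) (c : List Int)
    (fuel : Nat) (stk : List (Int × Int × PySem.Set Int)) (res : List Int) : List Int :=
  match stk with
  | [] => res
  | (cur, parent, above) :: stk' =>
    match fuel with
    | 0 => res   -- fuel is a totalisation guard only; inside Pre_ it is never exhausted
    | fuel' + 1 =>
      match PySem.List.pyGet? c cur, PySem.Dict.get? (PySem.Dict.mk graph) cur with
      | some col, some nbrs =>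
        dfsAltLoop graph c fuel'
          (nbrs.foldl
            (fun s i => if i ≠ parent then
                (i, cur, if PySem.Set.contains above col then above else PySem.Set.add above col) :: s
              else s) stk')
          (if PySem.Set.contains above col then res else res ++ [cur + 1])
      | _, _ => res

def dfs_alt (graph : List (Int × List Int)) (n : Int) (c : List Int) : List Int :=
  PySem.List.sorted
    (dfsAltLoop graph c
      ((graph.length + (graph.map (fun p => p.2.length)).sum + 2) ^ (graph.length + 2))
      [((0 : Int), (-1 : Int), PySem.Set.empty)] [])
    (fun x => x) false

-- ===== PRECONDITION & SPEC =====
-- helper definitions for the precondition: adjacency lookup and the set of nodes reachable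
-- from the root 0 (a monotone closure; graph.length + 1 expansion rounds always suffice)
def childrenOf (g : List (Int × List Int)) (v : Int) : List Int :=
  (PySem.Dict.get? (PySem.Dict.mk g) v).getD []
-- children as the traversal sees them: at the root the parent sentinel -1 is skipped
def pvChildren (g : List (Int × List Int)) (v : Int) : List Int :=
  if v = 0 then (childrenOf g v).filter (fun y => decide (y ≠ -1)) else childrenOf g v
def pvReachStep (g : List (Int × List Int)) (R : List Int) : List Int :=
  PySem.Set.update R (R.flatMap (fun x => pvChildren g x))
def pvReachAux (g : List (Int × List Int)) : Nat → List Int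
  | 0 => [0]
  | n + 1 => pvReachStep g (pvReachAux g n)
def pvReach (g : List (Int × List Int)) : List Int := pvReachAux g (g.length + 1)

-- Pre_ requires the component reachable from node 0 (children equal to the parent sentinel -1
-- are skipped at the root, as both programs do) to be a well-formed rooted tree: every reachable
-- node is a key with a valid colour index, the root 0 is never listed as a child of a reachable
-- node, and no node is listed twice as a child of reachable nodes.  On graphs whose reachable
-- component has cycles or repeated child entries A still returns, but its value is an artefact
-- of the visited-set/decrement interplay, and B revisits nodes or diverges there.
def Pre_dfs (graph : List (Int × List Int)) (n : Int) (c : List Int) : Prop :=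
  (∀ x ∈ pvReach graph, x ∈ graph.map Prod.fst) ∧
  (∀ x ∈ pvReach graph, PySem.List.pyGet? c x ≠ none) ∧
  (∀ x ∈ pvReach graph, (0 : Int) ∉ pvChildren graph x) ∧
  ((pvReach graph).map (pvChildren graph)).flatten.Nodup
instance (graph : List (Int × List Int)) (n : Int) (c : List Int) : Decidable (Pre_dfs graph n c) := by
  unfold Pre_dfs; infer_instance

def pvWitness_dfs : (List (Int × List Int)) × Int × List Int :=
  ([((0 : Int), [(1 : Int), 2]), (1, []), (2, [])], 3, [0, 1, 0])

def Spec_dfs (graph : List (Int × List Int)) (n : Int) (c : List Int) (out : List Int) : Prop := out = dfs_alt graph n c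
instance (graph : List (Int × List Int)) (n : Int) (c : List Int) (out : List Int) : Decidable (Spec_dfs graph n c out) := by unfold Spec_dfs; infer_instance

-- ===== CLAIM (what is proved, stated in full; the proofs are below) =====
def Claim_equal_dfs : Prop := ∀ (graph : List (Int × List Int)) (n : Int) (c : List Int), Dom_dfs graph n c → Pre_dfs graph n c → Spec_dfs graph n c (dfs graph n c)

-- ===== LEMMAS AND PROOFS =====

def keysL (g : List (Int × List Int)) : List Int := g.map Prod.fst

-- the invariant carried by both simulations: fresh is a child-closed set of keys containing
-- cur, and cur is nobody's child inside fresh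
def TreeInv (g : List (Int × List Int)) (fresh : Finset Int) (cur : Int) : Prop :=
  cur ∈ fresh ∧ (∀ x ∈ fresh, x ∈ pvReach g) ∧
  (∀ x ∈ fresh, ∀ y ∈ pvChildren g x, y ∈ fresh) ∧
  (∀ x ∈ fresh, cur ∉ pvChildren g x)

-- the reference output of the common traversal, recursing over a shrinking fresh set
def goR (g : List (Int × List Int)) (c : List Int) (fresh : Finset Int)
    (cur parent : Int) (path : List Int) : List Int :=
  if h : cur ∈ fresh then
    (if path.count ((PySem.List.pyGet? c cur).getD 0) = 0 then [cur + 1] else []) ++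
      (((childrenOf g cur).filter (fun i => decide (i ≠ parent))).reverse.map
        (fun i => goR g c (fresh.erase cur) i cur (((PySem.List.pyGet? c cur).getD 0) :: path))).flatten
  else []
termination_by fresh.card
decreasing_by exact Finset.card_erase_lt_of_mem h

theorem goR_pos (g : List (Int × List Int)) (c : List Int) (fresh : Finset Int)
    (cur parent : Int) (path : List Int) (col : Int)
    (h : cur ∈ fresh) (hc : PySem.List.pyGet? c cur = some col) :
    goR g c fresh cur parent path =
      (if path.count col = 0 then [cur + 1] else []) ++
        (((childrenOf g cur).filter (fun i => decide (i ≠ parent))).reverse.map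
          (fun i => goR g c (fresh.erase cur) i cur (col :: path))).flatten := by
  rw [goR]
  simp [h, hc]

theorem children_get? (g : List (Int × List Int)) (v : Int) (hv : v ∈ keysL g) :
    PySem.Dict.get? (PySem.Dict.mk g) v = some (childrenOf g v) := by
  cases hg : PySem.Dict.get? (PySem.Dict.mk g) v with
  | none =>
    exfalso
    exact ((PySem.Dict.get?_eq_none_iff_not_mem_keys _ v).mp hg) (by simpa [PySem.Dict.keys, keysL] using hv)
  | some l => simp [childrenOf, hg]

theorem nodup_flatten_part {L : List (List Int)} (h : L.flatten.Nodup) {l : List Int}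
    (hl : l ∈ L) : l.Nodup := by
  induction L with
  | nil => simp at hl
  | cons a t ih =>
    rw [List.flatten_cons] at h
    rcases List.mem_cons.mp hl with rfl | hl'
    · exact h.of_append_left
    · exact ih h.of_append_right hl'

-- pairwise disjointness of the child lists of distinct members of a duplicate-free list
theorem uniq_list (f : Int → List Int) : ∀ (l : List Int), l.Nodup →
    ((l.map f).flatten).Nodup →
    ∀ {a b y : Int}, a ∈ l → b ∈ l → a ≠ b → y ∈ f a → y ∈ f b → False := by
  intro l
  induction l with
  | nil => intro _ _ a b y ha; simp at ha
  | cons r t ih =>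
    intro hnd hfl a b y ha hb hab hya hyb
    rw [List.map_cons, List.flatten_cons] at hfl
    have hdisj : ∀ x ∈ f r, x ∉ ((t.map f).flatten) :=
      fun x hx => (List.disjoint_of_nodup_append hfl) hx
    have hsub : ∀ {z w : Int}, z ∈ t → w ∈ f z → w ∈ ((t.map f).flatten) :=
      fun hz hw => List.mem_flatten.mpr ⟨_, List.mem_map.mpr ⟨_, hz, rfl⟩, hw⟩
    rcases List.mem_cons.mp ha with rfl | hat
    · rcases List.mem_cons.mp hb with rfl | hbt
      · exact hab rfl
      · exact hdisj y hya (hsub hbt hyb)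
    · rcases List.mem_cons.mp hb with rfl | hbt
      · exact hdisj y hyb (hsub hat hya)
      · exact ih (List.nodup_cons.mp hnd).2 hfl.of_append_right hat hbt hab hya hyb

theorem reachStep_supset (g : List (Int × List Int)) (R : List Int) :
    ∀ x ∈ R, x ∈ pvReachStep g R := by
  intro x hx
  exact (PySem.Set.mem_update R _ x).mpr (Or.inl hx)

theorem reachStep_child (g : List (Int × List Int)) (R : List Int) {x y : Int}
    (hx : x ∈ R) (hy : y ∈ pvChildren g x) : y ∈ pvReachStep g R := by
  exact (PySem.Set.mem_update R _ y).mpr (Or.inr (List.mem_flatMap.mpr ⟨x, hx, hy⟩))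

theorem reachAux_mono (g : List (Int × List Int)) {m n : Nat} (h : m ≤ n) :
    ∀ x ∈ pvReachAux g m, x ∈ pvReachAux g n := by
  induction n with
  | zero =>
    intro x hx
    rw [Nat.le_zero.mp h] at hx
    exact hx
  | succ n ih =>
    intro x hx
    rcases Nat.lt_or_ge m (n + 1) with hlt | hge
    · exact reachStep_supset g (pvReachAux g n) x (ih (by omega) x hx)
    · have : m = n + 1 := by omega
      rw [this] at hx
      exact hx

theorem reachAux_nodup (g : List (Int × List Int)) : ∀ n, (pvReachAux g n).Nodup := by
  intro n
  induction n with
  | zero => simp [pvReachAux]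
  | succ n ih => exact PySem.Set.nodup_update _ _ ih

theorem reach_nodup (g : List (Int × List Int)) : (pvReach g).Nodup := reachAux_nodup g _

theorem reach_zero (g : List (Int × List Int)) : (0 : Int) ∈ pvReach g := by
  have h0 : (0 : Int) ∈ pvReachAux g 0 := by simp [pvReachAux]
  exact reachAux_mono g (Nat.zero_le _) 0 h0

theorem reach_growth (g : List (Int × List Int)) : ∀ n,
    n + 1 ≤ (pvReachAux g n).length ∨ pvReachStep g (pvReachAux g n) = pvReachAux g n := by
  intro n
  induction n with
  | zero => exact Or.inl (by simp [pvReachAux])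
  | succ n ih =>
    by_cases hst : pvReachStep g (pvReachAux g n) = pvReachAux g n
    · right
      show pvReachStep g (pvReachStep g (pvReachAux g n)) = pvReachStep g (pvReachAux g n)
      rw [hst]
      exact hst
    · left
      rcases ih with hlen | hfix
      · have hexp : pvReachAux g (n + 1)
            = pvReachAux g n ++ (PySem.Set.ofList ((pvReachAux g n).flatMap (fun x => pvChildren g x))).filter
                (fun y => !(PySem.Set.contains (pvReachAux g n) y)) :=
          PySem.Set.update_eq_append_filter _ _
        have hne : (PySem.Set.ofList ((pvReachAux g n).flatMap (fun x => pvChildren g x))).filter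
            (fun y => !(PySem.Set.contains (pvReachAux g n) y)) ≠ [] := by
          intro hnil
          apply hst
          show PySem.Set.update _ _ = _
          rw [PySem.Set.update_eq_append_filter, hnil, List.append_nil]
        have : 0 < ((PySem.Set.ofList ((pvReachAux g n).flatMap (fun x => pvChildren g x))).filter
            (fun y => !(PySem.Set.contains (pvReachAux g n) y))).length :=
          List.length_pos_iff.mpr hne
        rw [hexp, List.length_append]
        omega
      · exact absurd hfix hst

theorem reach_closed (g : List (Int × List Int))
    (hC1 : ∀ x ∈ pvReach g, x ∈ keysL g) :
    ∀ x ∈ pvReach g, ∀ y ∈ pvChildren g x, y ∈ pvReach g := by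
  rcases reach_growth g (g.length + 1) with hlen | hfix
  · exfalso
    have hnd := reach_nodup g
    have hcard : (pvReach g).toFinset.card = (pvReach g).length := List.toFinset_card_of_nodup hnd
    have hsub : (pvReach g).toFinset ⊆ (g.map Prod.fst).toFinset := by
      intro x hx
      exact List.mem_toFinset.mpr (hC1 x (List.mem_toFinset.mp hx))
    have h1 : (pvReach g).toFinset.card ≤ (g.map Prod.fst).toFinset.card :=
      Finset.card_le_card hsub
    have h2 : (g.map Prod.fst).toFinset.card ≤ g.length := by
      have := List.toFinset_card_le (g.map Prod.fst)
      simpa using this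
    have : g.length + 2 ≤ (pvReach g).length := hlen
    omega
  · intro x hx y hy
    have := reachStep_child g (pvReach g) hx hy
    rw [show pvReach g = pvReachAux g (g.length + 1) from rfl] at this ⊢
    rwa [hfix] at this

-- disjointness instantiated on the reachable component
theorem uniq (g : List (Int × List Int))
    (h4 : ((pvReach g).map (pvChildren g)).flatten.Nodup)
    {a b y : Int} (haR : a ∈ pvReach g) (hbR : b ∈ pvReach g) (hab : a ≠ b)
    (ha : y ∈ pvChildren g a) (hb : y ∈ pvChildren g b) : False :=
  uniq_list (pvChildren g) (pvReach g) (reach_nodup g) h4 haR hbR hab ha hb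

theorem children_nodup (g : List (Int × List Int))
    (h4 : ((pvReach g).map (pvChildren g)).flatten.Nodup)
    {v : Int} (hv : v ∈ pvReach g) : (pvChildren g v).Nodup :=
  nodup_flatten_part h4 (List.mem_map.mpr ⟨v, hv, rfl⟩)

theorem mem_pvChildren_of_filter (g : List (Int × List Int)) {cur parent i : Int}
    (hpar : cur = 0 → parent = -1)
    (hi : i ∈ (childrenOf g cur).filter (fun j => decide (j ≠ parent))) :
    i ∈ pvChildren g cur := by
  by_cases h0 : cur = 0
  · subst h0
    rw [hpar rfl] at hi
    simpa [pvChildren] using hi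
  · rw [List.mem_filter] at hi
    simpa [pvChildren, h0] using hi.1

theorem filtered_nodup (g : List (Int × List Int))
    (h4 : ((pvReach g).map (pvChildren g)).flatten.Nodup) {cur parent : Int}
    (hcur : cur ∈ pvReach g) (hpar : cur = 0 → parent = -1) :
    ((childrenOf g cur).filter (fun j => decide (j ≠ parent))).Nodup := by
  have hnd := children_nodup g h4 hcur
  by_cases h0 : cur = 0
  · subst h0
    rw [hpar rfl]
    simpa [pvChildren] using hnd
  · simp only [pvChildren, if_neg h0] at hnd
    exact hnd.filter _

-- the invariant descends from cur to a child i, with the already-finished part Δacc removed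
theorem inv_child (g : List (Int × List Int))
    (h4 : ((pvReach g).map (pvChildren g)).flatten.Nodup)
    {fresh : Finset Int} {cur : Int} (hInv : TreeInv g fresh cur)
    (Δacc : Finset Int) (l : List Int)
    (hA1 : ∀ x ∈ Δacc, x ∈ fresh ∧ x ≠ cur)
    (hA2 : ∀ x ∈ Δacc, (x ∈ pvChildren g cur ∧ x ∉ l) ∨ ∃ y ∈ Δacc, x ∈ pvChildren g y)
    (i : Int) (hi : i ∈ pvChildren g cur) (hil : i ∈ l) :
    TreeInv g ((fresh.erase cur) \ Δacc) i := by
  obtain ⟨hcur, hR, hclosed, hnochild⟩ := hInv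
  have hcurR : cur ∈ pvReach g := hR cur hcur
  have hic : i ≠ cur := by
    intro h
    exact hnochild cur hcur (h ▸ hi)
  have hifresh : i ∈ fresh := hclosed cur hcur i hi
  have hiΔ : i ∉ Δacc := by
    intro hmem
    rcases hA2 i hmem with ⟨_, hnl⟩ | ⟨y, hy, hcy⟩
    · exact hnl hil
    · exact uniq g h4 (hR y (hA1 y hy).1) hcurR (hA1 y hy).2 hcy hi
  refine ⟨?_, ?_, ?_, ?_⟩
  · exact Finset.mem_sdiff.mpr ⟨Finset.mem_erase.mpr ⟨hic, hifresh⟩, hiΔ⟩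
  · intro x hx
    exact hR x (Finset.mem_of_mem_erase (Finset.mem_sdiff.mp hx).1)
  · intro x hx y hy
    obtain ⟨hxe, hxΔ⟩ := Finset.mem_sdiff.mp hx
    obtain ⟨hxc, hxf⟩ := Finset.mem_erase.mp hxe
    have hyf : y ∈ fresh := hclosed x hxf y hy
    have hyc : y ≠ cur := by
      intro h
      exact hnochild x hxf (h ▸ hy)
    have hyΔ : y ∉ Δacc := by
      intro hmem
      rcases hA2 y hmem with ⟨hyc2, _⟩ | ⟨z, hz, hcz⟩
      · exact uniq g h4 (hR x hxf) hcurR hxc hy hyc2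
      · exact uniq g h4 (hR z (hA1 z hz).1) (hR x hxf) (fun h => hxΔ (h ▸ hz)) hcz hy
    exact Finset.mem_sdiff.mpr ⟨Finset.mem_erase.mpr ⟨hyc, hyf⟩, hyΔ⟩
  · intro x hx hcontra
    obtain ⟨hxe, _⟩ := Finset.mem_sdiff.mp hx
    exact uniq g h4 (hR x (Finset.mem_of_mem_erase hxe)) hcurR
      (Finset.mem_erase.mp hxe).1 hcontra hi

-- a finished child subtree Δ never contains cur nor a pending sibling
theorem dprop_avoid (g : List (Int × List Int))
    (h4 : ((pvReach g).map (pvChildren g)).flatten.Nodup)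
    {fresh : Finset Int} {cur : Int} (hInv : TreeInv g fresh cur)
    (i : Int) (hi : i ∈ pvChildren g cur) (hic : i ≠ cur)
    (Δ : Finset Int) (hsub : ∀ x ∈ Δ, x ∈ fresh ∧ x ≠ cur)
    (hjust : ∀ x ∈ Δ, x = i ∨ ∃ y ∈ Δ, x ∈ pvChildren g y) :
    cur ∉ Δ ∧ ∀ s ∈ pvChildren g cur, s ≠ i → s ∉ Δ := by
  obtain ⟨hcur, hR, hclosed, hnochild⟩ := hInv
  have hcurR : cur ∈ pvReach g := hR cur hcur
  constructor
  · intro hmem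
    rcases hjust cur hmem with h | ⟨y, hy, hcy⟩
    · exact hic h.symm
    · exact hnochild y (hsub y hy).1 hcy
  · intro s hs hsi hmem
    rcases hjust s hmem with h | ⟨y, hy, hcy⟩
    · exact hsi h
    · exact uniq g h4 (hR y (hsub y hy).1) hcurR (hsub y hy).2 hcy hs

-- TreeInv survives erasing cur when moving to a child (the Δacc = ∅ instance)
theorem inv_erase (g : List (Int × List Int))
    (h4 : ((pvReach g).map (pvChildren g)).flatten.Nodup)
    {fresh : Finset Int} {cur : Int} (hInv : TreeInv g fresh cur)
    (i : Int) (hi : i ∈ pvChildren g cur) :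
    TreeInv g (fresh.erase cur) i := by
  have h := inv_child g h4 hInv ∅ [i] (by simp) (by simp) i hi (by simp)
  simpa using h

theorem goR_irrel (g : List (Int × List Int)) (c : List Int)
    (h4 : ((pvReach g).map (pvChildren g)).flatten.Nodup)
    (hC3 : ∀ x ∈ pvReach g, (0 : Int) ∉ pvChildren g x) :
    ∀ (N : Nat) (fresh1 fresh2 : Finset Int) (cur parent : Int) (path : List Int),
      fresh1.card ≤ N → (cur = 0 → parent = -1) → TreeInv g fresh1 cur → TreeInv g fresh2 cur →
      goR g c fresh1 cur parent path = goR g c fresh2 cur parent path := by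
  intro N
  induction N with
  | zero =>
    intro f1 f2 cur parent path hcard hpar h1 h2
    have : 0 < f1.card := Finset.card_pos.mpr ⟨cur, h1.1⟩
    omega
  | succ N ih =>
    intro f1 f2 cur parent path hcard hpar h1 h2
    rw [goR, goR, dif_pos h1.1, dif_pos h2.1]
    congr 2
    apply List.map_congr_left
    intro i hi
    have hic : i ∈ pvChildren g cur :=
      mem_pvChildren_of_filter g hpar (List.mem_reverse.mp hi)
    have hc1 : (f1.erase cur).card ≤ N := by
      have := Finset.card_erase_of_mem h1.1
      omega
    have hpar' : i = 0 → cur = -1 := fun h =>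
      absurd (h ▸ hic) (hC3 cur (h1.2.1 cur h1.1))
    exact ih (f1.erase cur) (f2.erase cur) i cur (((PySem.List.pyGet? c cur).getD 0) :: path) hc1
      hpar' (inv_erase g h4 h1 i hic) (inv_erase g h4 h2 i hic)

theorem foldl_push {β : Type} (l : List Int) (parent : Int) (f : Int → β) (init : List β) :
    l.foldl (fun s i => if i ≠ parent then f i :: s else s) init
      = ((l.filter (fun i => decide (i ≠ parent))).reverse.map f) ++ init := by
  induction l generalizing init with
  | nil => simp
  | cons a t ih =>
    simp only [List.foldl_cons, List.filter_cons]
    by_cases hap : a = parent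
    · rw [if_neg (by simp [hap]), ih]
      simp [hap]
    · rw [if_pos hap, ih]
      simp [hap, List.reverse_cons, List.map_append, List.append_assoc]

-- ===== unfolding lemmas for the two loops =====

theorem dfsLoop_nil (g : List (Int × List Int)) (c : List Int) (vis : PySem.Set Int)
    (d : PySem.Dict Int Int) (res : List Int) : dfsLoop g c [] vis d res = res := by
  rw [dfsLoop]

theorem dfsLoop_visited (g : List (Int × List Int)) (c : List Int)
    (cur parent : Int) (stk : List (Int × Int)) (vis : PySem.Set Int)
    (d : PySem.Dict Int Int) (res : List Int) (col : Int)
    (hv : PySem.Set.contains vis cur = true) (hc : PySem.List.pyGet? c cur = some col) :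
    dfsLoop g c ((cur, parent) :: stk) vis d res
      = dfsLoop g c stk vis (d.insert col (d.getD col 0 - 1)) res := by
  rw [dfsLoop]
  rw [dif_pos hv, hc]

theorem dfsLoop_expand (g : List (Int × List Int)) (c : List Int)
    (cur parent : Int) (stk : List (Int × Int)) (vis : PySem.Set Int)
    (d : PySem.Dict Int Int) (res : List Int) (nbrs : List Int) (col : Int)
    (hv : PySem.Set.contains vis cur = false)
    (hg : PySem.Dict.get? (PySem.Dict.mk g) cur = some nbrs)
    (hc : PySem.List.pyGet? c cur = some col) :
    dfsLoop g c ((cur, parent) :: stk) vis d res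
      = dfsLoop g c
          (((nbrs.filter (fun i => decide (i ≠ parent))).reverse.map (fun i => (i, cur)))
            ++ (cur, parent) :: stk)
          (PySem.Set.add vis cur) (d.insert col (d.getD col 0 + 1))
          (if d.getD col 0 = 0 then res ++ [cur + 1] else res) := by
  rw [dfsLoop]
  rw [dif_neg (by rw [hv]; simp), hg, hc]
  show dfsLoop g c
      (nbrs.foldl (fun s i => if i ≠ parent then (i, cur) :: s else s) ((cur, parent) :: stk))
      (PySem.Set.add vis cur) (d.insert col (d.getD col 0 + 1))
      (if d.getD col 0 = 0 then res ++ [cur + 1] else res) = _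
  rw [foldl_push]

theorem dfsAltLoop_nil (g : List (Int × List Int)) (c : List Int) (f : Nat) (res : List Int) :
    dfsAltLoop g c f [] res = res := by
  rw [dfsAltLoop]

theorem dfsAltLoop_step (g : List (Int × List Int)) (c : List Int) (f : Nat)
    (cur parent : Int) (above : PySem.Set Int) (stk : List (Int × Int × PySem.Set Int))
    (res : List Int) (nbrs : List Int) (col : Int)
    (hc : PySem.List.pyGet? c cur = some col)
    (hg : PySem.Dict.get? (PySem.Dict.mk g) cur = some nbrs) :
    dfsAltLoop g c (f + 1) ((cur, parent, above) :: stk) res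
      = dfsAltLoop g c f
          (((nbrs.filter (fun i => decide (i ≠ parent))).reverse.map
              (fun i => (i, cur,
                if PySem.Set.contains above col then above else PySem.Set.add above col)))
            ++ stk)
          (if PySem.Set.contains above col then res else res ++ [cur + 1]) := by
  rw [dfsAltLoop]
  rw [hc, hg]
  show dfsAltLoop g c f
      (nbrs.foldl
        (fun s i => if i ≠ parent then
            (i, cur, if PySem.Set.contains above col then above else PySem.Set.add above col) :: s
          else s) stk)
      (if PySem.Set.contains above col then res else res ++ [cur + 1]) = _
  rw [foldl_push]

-- ===== the two simulations =====

theorem simA (g : List (Int × List Int)) (c : List Int)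
    (h4 : ((pvReach g).map (pvChildren g)).flatten.Nodup)
    (hC1 : ∀ x ∈ pvReach g, x ∈ keysL g)
    (hC2 : ∀ x ∈ pvReach g, PySem.List.pyGet? c x ≠ none)
    (hC3 : ∀ x ∈ pvReach g, (0 : Int) ∉ pvChildren g x) :
    ∀ (N : Nat) (fresh : Finset Int), fresh.card ≤ N →
    ∀ (cur parent : Int) (stk : List (Int × Int)) (vis : PySem.Set Int)
      (d : PySem.Dict Int Int) (res : List Int) (path : List Int),
      TreeInv g fresh cur →
      (∀ x ∈ fresh, x ∉ vis) →
      (∀ x, d.getD x 0 = (path.count x : Int)) →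
      PySem.List.pyGet? c cur ≠ none →
      (cur = 0 → parent = -1) →
      ∃ (vis' : PySem.Set Int) (d' : PySem.Dict Int Int) (Δ : Finset Int),
        dfsLoop g c ((cur, parent) :: stk) vis d res
          = dfsLoop g c stk vis' d' (res ++ goR g c fresh cur parent path) ∧
        (∀ x, d'.getD x 0 = (path.count x : Int)) ∧
        (∀ x : Int, x ∈ vis' ↔ x ∈ vis ∨ x ∈ Δ) ∧
        (∀ x ∈ Δ, x ∈ fresh) ∧
        (∀ x ∈ Δ, x = cur ∨ ∃ y ∈ Δ, x ∈ pvChildren g y) := by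
  intro N
  induction N with
  | zero =>
    intro fresh hcard cur parent stk vis d res path hInv _ _ _ _
    exact absurd (Finset.card_pos.mpr ⟨cur, hInv.1⟩) (by omega)
  | succ N ih =>
    intro fresh hcard cur parent stk vis d res path hInv hvis hd hccur hpar
    obtain ⟨col, hcol⟩ : ∃ col, PySem.List.pyGet? c cur = some col := by
      cases h : PySem.List.pyGet? c cur with
      | none => exact absurd h hccur
      | some col => exact ⟨col, rfl⟩
    have hcurk : cur ∈ keysL g := hC1 cur (hInv.2.1 cur hInv.1)
    have hget : PySem.Dict.get? (PySem.Dict.mk g) cur = some (childrenOf g cur) :=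
      children_get? g cur hcurk
    have hvcur : PySem.Set.contains vis cur = false :=
      (pvContainsFalse vis cur).mpr (hvis cur hInv.1)
    have hcard' : (fresh.erase cur).card ≤ N := by
      have := Finset.card_erase_of_mem hInv.1
      have := Finset.card_pos.mpr ⟨cur, hInv.1⟩
      omega
    -- the inner induction over the pushed child entries
    have inner : ∀ (l : List Int), l.Nodup →
        (∀ i ∈ l, i ∈ pvChildren g cur) →
        ∀ (Δacc : Finset Int) (vis1 : PySem.Set Int) (d1 : PySem.Dict Int Int) (res1 : List Int),
          (∀ x ∈ Δacc, x ∈ fresh ∧ x ≠ cur) →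
          (∀ x ∈ Δacc, (x ∈ pvChildren g cur ∧ x ∉ l) ∨ ∃ y ∈ Δacc, x ∈ pvChildren g y) →
          (∀ x ∈ fresh, x ≠ cur → x ∉ Δacc → x ∉ vis1) →
          (∀ x, d1.getD x 0 = ((col :: path).count x : Int)) →
          ∃ (vis2 : PySem.Set Int) (d2 : PySem.Dict Int Int) (Δs : Finset Int),
            dfsLoop g c (l.map (fun i => (i, cur)) ++ (cur, parent) :: stk) vis1 d1 res1
              = dfsLoop g c ((cur, parent) :: stk) vis2 d2
                  (res1 ++ (l.map (fun i =>
                    goR g c (fresh.erase cur) i cur (col :: path))).flatten) ∧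
            (∀ x, d2.getD x 0 = ((col :: path).count x : Int)) ∧
            (∀ x : Int, x ∈ vis2 ↔ x ∈ vis1 ∨ x ∈ Δs) ∧
            (∀ x ∈ Δs, x ∈ fresh ∧ x ≠ cur ∧ x ∉ Δacc) ∧
            (∀ x ∈ Δs, x ∈ pvChildren g cur ∨
              ∃ y, (y ∈ Δacc ∨ y ∈ Δs) ∧ x ∈ pvChildren g y) := by
      intro l
      induction l with
      | nil =>
        intro _ _ Δacc vis1 d1 res1 _ _ _ hd1
        exact ⟨vis1, d1, ∅, by simp, hd1, by simp, by simp, by simp⟩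
      | cons i l' ihl =>
        intro hnd hmem Δacc vis1 d1 res1 hA1 hA2 hvis1 hd1
        have hi : i ∈ pvChildren g cur := hmem i (List.mem_cons_self ..)
        have hcurR : cur ∈ pvReach g := hInv.2.1 cur hInv.1
        have hpar_i : i = 0 → cur = -1 := fun h => absurd (h ▸ hi) (hC3 cur hcurR)
        have hic : i ≠ cur := fun h => hInv.2.2.2 cur hInv.1 (h ▸ hi)
        have hiR : i ∈ pvReach g := hInv.2.1 i (hInv.2.2.1 cur hInv.1 i hi)
        have hInv_i : TreeInv g ((fresh.erase cur) \ Δacc) i :=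
          inv_child g h4 hInv Δacc (i :: l') hA1 hA2 i hi (List.mem_cons_self ..)
        have hcard_i : ((fresh.erase cur) \ Δacc).card ≤ N :=
          le_trans (Finset.card_le_card (Finset.sdiff_subset)) hcard'
        have hvis_i : ∀ x ∈ (fresh.erase cur) \ Δacc, x ∉ vis1 := by
          intro x hx
          obtain ⟨hxe, hxΔ⟩ := Finset.mem_sdiff.mp hx
          exact hvis1 x (Finset.mem_of_mem_erase hxe) (Finset.mem_erase.mp hxe).1 hxΔ
        obtain ⟨visA, dA, ΔA, heqA, hdA, hvA, hΔAf, hΔAj⟩ :=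
          ih ((fresh.erase cur) \ Δacc) hcard_i i cur
            (l'.map (fun j => (j, cur)) ++ (cur, parent) :: stk) vis1 d1 res1 (col :: path)
            hInv_i hvis_i hd1 (hC2 i hiR) hpar_i
        -- rewrite the child output to the canonical fresh set
        have hgoR : goR g c ((fresh.erase cur) \ Δacc) i cur (col :: path)
            = goR g c (fresh.erase cur) i cur (col :: path) :=
          goR_irrel g c h4 hC3 N ((fresh.erase cur) \ Δacc) (fresh.erase cur) i cur
            (col :: path) hcard_i hpar_i hInv_i (inv_erase g h4 hInv i hi)
        -- the finished subtree avoids cur and the pending siblings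
        have havoid := dprop_avoid g h4 hInv i hi hic ΔA
          (fun x hx => ⟨Finset.mem_of_mem_erase (Finset.mem_sdiff.mp (hΔAf x hx)).1,
            (Finset.mem_erase.mp (Finset.mem_sdiff.mp (hΔAf x hx)).1).1⟩) hΔAj
        -- recurse on the remaining siblings
        obtain ⟨vis2, d2, Δs, heqB, hd2, hv2, hΔsf, hΔsj⟩ :=
          ihl hnd.of_cons (fun j hj => hmem j (List.mem_cons_of_mem _ hj)) (Δacc ∪ ΔA)
            visA dA (res1 ++ goR g c (fresh.erase cur) i cur (col :: path))
            (by
              intro x hx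
              rcases Finset.mem_union.mp hx with h | h
              · exact hA1 x h
              · exact ⟨Finset.mem_of_mem_erase (Finset.mem_sdiff.mp (hΔAf x h)).1,
                  (Finset.mem_erase.mp (Finset.mem_sdiff.mp (hΔAf x h)).1).1⟩)
            (by
              intro x hx
              rcases Finset.mem_union.mp hx with h | h
              · rcases hA2 x h with ⟨hxc, hxl⟩ | ⟨y, hy, hcy⟩
                · exact Or.inl ⟨hxc, fun hh => hxl (List.mem_cons_of_mem _ hh)⟩
                · exact Or.inr ⟨y, Finset.mem_union_left _ hy, hcy⟩
              · rcases hΔAj x h with rfl | ⟨y, hy, hcy⟩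
                · exact Or.inl ⟨hi, (List.nodup_cons.mp hnd).1⟩
                · exact Or.inr ⟨y, Finset.mem_union_right _ hy, hcy⟩)
            (by
              intro x hxf hxc hxΔ
              rw [hvA x]
              push Not
              exact ⟨hvis1 x hxf hxc (fun hh => hxΔ (Finset.mem_union_left _ hh)),
                fun hh => hxΔ (Finset.mem_union_right _ hh)⟩)
            hdA
        refine ⟨vis2, d2, ΔA ∪ Δs, ?_, hd2, ?_, ?_, ?_⟩
        · rw [List.map_cons, List.cons_append, heqA, hgoR, heqB]
          simp [List.append_assoc]
        · intro x
          rw [hv2 x, hvA x]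
          simp [Finset.mem_union, or_assoc]
        · intro x hx
          rcases Finset.mem_union.mp hx with h | h
          · exact ⟨Finset.mem_of_mem_erase (Finset.mem_sdiff.mp (hΔAf x h)).1,
              (Finset.mem_erase.mp (Finset.mem_sdiff.mp (hΔAf x h)).1).1,
              (Finset.mem_sdiff.mp (hΔAf x h)).2⟩
          · exact ⟨(hΔsf x h).1, (hΔsf x h).2.1,
              fun hh => (hΔsf x h).2.2 (Finset.mem_union_left _ hh)⟩
        · intro x hx
          rcases Finset.mem_union.mp hx with h | h
          · rcases hΔAj x h with rfl | ⟨y, hy, hcy⟩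
            · exact Or.inl hi
            · exact Or.inr ⟨y, Or.inr (Finset.mem_union_left _ hy), hcy⟩
          · rcases hΔsj x h with hc1 | ⟨y, hy, hcy⟩
            · exact Or.inl hc1
            · rcases hy with hy | hy
              · rcases Finset.mem_union.mp hy with hy' | hy'
                · exact Or.inr ⟨y, Or.inl hy', hcy⟩
                · exact Or.inr ⟨y, Or.inr (Finset.mem_union_left _ hy'), hcy⟩
              · exact Or.inr ⟨y, Or.inr (Finset.mem_union_right _ hy), hcy⟩
    -- expand cur
    have hres0 : (if d.getD col 0 = 0 then res ++ [cur + 1] else res)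
        = res ++ (if path.count col = 0 then [cur + 1] else []) := by
      rw [hd col]
      by_cases hz : path.count col = 0 <;> simp [hz]
    have hd1 : ∀ x, (d.insert col (d.getD col 0 + 1)).getD x 0 = (((col :: path).count x : Nat) : Int) := by
      intro x
      rw [PySem.Dict.getD_insert]
      by_cases hxc : x = col
      · subst hxc
        rw [if_pos rfl, hd x, List.count_cons_self]
        push_cast
        ring
      · rw [if_neg hxc, hd x]
        have hcx : ¬ (col = x) := fun h => hxc h.symm
        simp [hcx]
    have hl0nd : (((childrenOf g cur).filter (fun i => decide (i ≠ parent))).reverse).Nodup :=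
      (List.nodup_reverse).mpr (filtered_nodup g h4 (hInv.2.1 cur hInv.1) hpar)
    have hl0mem : ∀ i ∈ ((childrenOf g cur).filter (fun i => decide (i ≠ parent))).reverse,
        i ∈ pvChildren g cur := by
      intro i hi
      exact mem_pvChildren_of_filter g hpar (List.mem_reverse.mp hi)
    have hvis1 : ∀ x ∈ fresh, x ≠ cur → x ∉ (∅ : Finset Int) → x ∉ PySem.Set.add vis cur := by
      intro x hxf hxc _
      intro hm
      rcases (PySem.Set.mem_add vis cur x).mp hm with h | h
      · exact hvis x hxf h
      · exact hxc h
    obtain ⟨vis2, d2, Δs, heq, hd2, hv2, hΔf, hΔj⟩ :=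
      inner (((childrenOf g cur).filter (fun i => decide (i ≠ parent))).reverse) hl0nd hl0mem
        ∅ (PySem.Set.add vis cur) (d.insert col (d.getD col 0 + 1))
        (res ++ (if path.count col = 0 then [cur + 1] else []))
        (by simp) (by simp) hvis1 hd1
    have hcurvis2 : cur ∈ vis2 :=
      (hv2 cur).mpr (Or.inl ((PySem.Set.mem_add vis cur cur).mpr (Or.inr rfl)))
    have hd3 : ∀ x, (d2.insert col (d2.getD col 0 - 1)).getD x 0 = (path.count x : Int) := by
      intro x
      rw [PySem.Dict.getD_insert]
      by_cases hxc : x = col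
      · subst hxc
        rw [if_pos rfl, hd2 x, List.count_cons_self]
        push_cast
        ring
      · rw [if_neg hxc, hd2 x]
        have hcx : ¬ (col = x) := fun h => hxc h.symm
        simp [hcx]
    refine ⟨vis2, d2.insert col (d2.getD col 0 - 1), insert cur Δs, ?_, hd3, ?_, ?_, ?_⟩
    · rw [dfsLoop_expand g c cur parent stk vis d res (childrenOf g cur) col hvcur hget hcol,
        hres0, heq,
        dfsLoop_visited g c cur parent stk vis2 d2 _ col
          ((PySem.Set.contains_iff vis2 cur).mpr hcurvis2) hcol,
        goR_pos g c fresh cur parent path col hInv.1 hcol]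
      simp [List.append_assoc]
    · intro x
      rw [hv2 x]
      constructor
      · rintro (hm | hm)
        · rcases (PySem.Set.mem_add vis cur x).mp hm with h | h
          · exact Or.inl h
          · exact Or.inr (Finset.mem_insert.mpr (Or.inl h))
        · exact Or.inr (Finset.mem_insert.mpr (Or.inr hm))
      · rintro (hm | hm)
        · exact Or.inl ((PySem.Set.mem_add vis cur x).mpr (Or.inl hm))
        · rcases Finset.mem_insert.mp hm with rfl | hm'
          · exact Or.inl ((PySem.Set.mem_add vis x x).mpr (Or.inr rfl))
          · exact Or.inr hm'
    · intro x hx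
      rcases Finset.mem_insert.mp hx with rfl | hm
      · exact hInv.1
      · exact (hΔf x hm).1
    · intro x hx
      rcases Finset.mem_insert.mp hx with rfl | hm
      · exact Or.inl rfl
      · rcases hΔj x hm with hc1 | ⟨y, hy, hcy⟩
        · exact Or.inr ⟨cur, Finset.mem_insert_self _ _, hc1⟩
        · rcases hy with hy | hy
          · simp at hy
          · exact Or.inr ⟨y, Finset.mem_insert.mpr (Or.inr hy), hcy⟩

theorem simB (g : List (Int × List Int)) (c : List Int)
    (h4 : ((pvReach g).map (pvChildren g)).flatten.Nodup)
    (hC1 : ∀ x ∈ pvReach g, x ∈ keysL g)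
    (hC2 : ∀ x ∈ pvReach g, PySem.List.pyGet? c x ≠ none)
    (hC3 : ∀ x ∈ pvReach g, (0 : Int) ∉ pvChildren g x) :
    ∀ (N : Nat) (fresh : Finset Int), fresh.card ≤ N →
    ∀ (cur parent : Int) (S : PySem.Set Int) (path : List Int),
      TreeInv g fresh cur →
      (∀ x : Int, x ∈ S ↔ x ∈ path) →
      PySem.List.pyGet? c cur ≠ none →
      (cur = 0 → parent = -1) →
      ∃ (k : Nat) (Δ : Finset Int),
        k ≤ Δ.card ∧
        (∀ x ∈ Δ, x ∈ fresh) ∧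
        (∀ x ∈ Δ, x = cur ∨ ∃ y ∈ Δ, x ∈ pvChildren g y) ∧
        ∀ (f : Nat) (stk : List (Int × Int × PySem.Set Int)) (res : List Int),
          dfsAltLoop g c (f + k) ((cur, parent, S) :: stk) res
            = dfsAltLoop g c f stk (res ++ goR g c fresh cur parent path) := by
  intro N
  induction N with
  | zero =>
    intro fresh hcard cur parent S path hInv _ _ _
    exact absurd (Finset.card_pos.mpr ⟨cur, hInv.1⟩) (by omega)
  | succ N ih =>
    intro fresh hcard cur parent S path hInv hS hccur hpar
    obtain ⟨col, hcol⟩ : ∃ col, PySem.List.pyGet? c cur = some col := by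
      cases h : PySem.List.pyGet? c cur with
      | none => exact absurd h hccur
      | some col => exact ⟨col, rfl⟩
    have hcurk : cur ∈ keysL g := hC1 cur (hInv.2.1 cur hInv.1)
    have hget : PySem.Dict.get? (PySem.Dict.mk g) cur = some (childrenOf g cur) :=
      children_get? g cur hcurk
    have hcard' : (fresh.erase cur).card ≤ N := by
      have := Finset.card_erase_of_mem hInv.1
      have := Finset.card_pos.mpr ⟨cur, hInv.1⟩
      omega
    have hbelow : ∀ x : Int,
        x ∈ (if PySem.Set.contains S col then S else PySem.Set.add S col) ↔
          x ∈ (col :: path) := by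
      intro x
      by_cases hm : PySem.Set.contains S col
      · rw [if_pos hm]
        have hcolp : col ∈ path := (hS col).mp ((PySem.Set.contains_iff S col).mp hm)
        rw [hS x]
        constructor
        · exact fun h => List.mem_cons_of_mem _ h
        · intro h
          rcases List.mem_cons.mp h with rfl | h
          · exact hcolp
          · exact h
      · rw [if_neg hm]
        rw [PySem.Set.mem_add, hS x, List.mem_cons]
        tauto
    have inner : ∀ (l : List Int), l.Nodup →
        (∀ i ∈ l, i ∈ pvChildren g cur) →
        ∀ (Δacc : Finset Int),
          (∀ x ∈ Δacc, x ∈ fresh ∧ x ≠ cur) →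
          (∀ x ∈ Δacc, (x ∈ pvChildren g cur ∧ x ∉ l) ∨ ∃ y ∈ Δacc, x ∈ pvChildren g y) →
          ∃ (k : Nat) (Δs : Finset Int),
            k ≤ Δs.card ∧
            (∀ x ∈ Δs, x ∈ fresh ∧ x ≠ cur ∧ x ∉ Δacc) ∧
            (∀ x ∈ Δs, x ∈ pvChildren g cur ∨
              ∃ y, (y ∈ Δacc ∨ y ∈ Δs) ∧ x ∈ pvChildren g y) ∧
            ∀ (f : Nat) (stk2 : List (Int × Int × PySem.Set Int)) (res1 : List Int),
              dfsAltLoop g c (f + k)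
                  (l.map (fun i => (i, cur,
                    if PySem.Set.contains S col then S else PySem.Set.add S col)) ++ stk2) res1
                = dfsAltLoop g c f stk2
                    (res1 ++ (l.map (fun i =>
                      goR g c (fresh.erase cur) i cur (col :: path))).flatten) := by
      intro l
      induction l with
      | nil =>
        intro _ _ Δacc _ _
        exact ⟨0, ∅, by simp, by simp, by simp, by intro f stk2 res1; simp⟩
      | cons i l' ihl =>
        intro hnd hmem Δacc hA1 hA2
        have hi : i ∈ pvChildren g cur := hmem i (List.mem_cons_self ..)
        have hcurR : cur ∈ pvReach g := hInv.2.1 cur hInv.1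
        have hpar_i : i = 0 → cur = -1 := fun h => absurd (h ▸ hi) (hC3 cur hcurR)
        have hic : i ≠ cur := fun h => hInv.2.2.2 cur hInv.1 (h ▸ hi)
        have hiR : i ∈ pvReach g := hInv.2.1 i (hInv.2.2.1 cur hInv.1 i hi)
        have hInv_i : TreeInv g ((fresh.erase cur) \ Δacc) i :=
          inv_child g h4 hInv Δacc (i :: l') hA1 hA2 i hi (List.mem_cons_self ..)
        have hcard_i : ((fresh.erase cur) \ Δacc).card ≤ N :=
          le_trans (Finset.card_le_card (Finset.sdiff_subset)) hcard'
        obtain ⟨kA, ΔA, hkA, hΔAf, hΔAj, heqA⟩ :=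
          ih ((fresh.erase cur) \ Δacc) hcard_i i cur
            (if PySem.Set.contains S col then S else PySem.Set.add S col) (col :: path)
            hInv_i hbelow (hC2 i hiR) hpar_i
        have hgoR : goR g c ((fresh.erase cur) \ Δacc) i cur (col :: path)
            = goR g c (fresh.erase cur) i cur (col :: path) :=
          goR_irrel g c h4 hC3 N ((fresh.erase cur) \ Δacc) (fresh.erase cur) i cur
            (col :: path) hcard_i hpar_i hInv_i (inv_erase g h4 hInv i hi)
        obtain ⟨kB, Δs, hkB, hΔsf, hΔsj, heqB⟩ :=
          ihl hnd.of_cons (fun j hj => hmem j (List.mem_cons_of_mem _ hj)) (Δacc ∪ ΔA)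
            (by
              intro x hx
              rcases Finset.mem_union.mp hx with h | h
              · exact hA1 x h
              · exact ⟨Finset.mem_of_mem_erase (Finset.mem_sdiff.mp (hΔAf x h)).1,
                  (Finset.mem_erase.mp (Finset.mem_sdiff.mp (hΔAf x h)).1).1⟩)
            (by
              intro x hx
              rcases Finset.mem_union.mp hx with h | h
              · rcases hA2 x h with ⟨hxc, hxl⟩ | ⟨y, hy, hcy⟩
                · exact Or.inl ⟨hxc, fun hh => hxl (List.mem_cons_of_mem _ hh)⟩
                · exact Or.inr ⟨y, Finset.mem_union_left _ hy, hcy⟩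
              · rcases hΔAj x h with rfl | ⟨y, hy, hcy⟩
                · exact Or.inl ⟨hi, (List.nodup_cons.mp hnd).1⟩
                · exact Or.inr ⟨y, Finset.mem_union_right _ hy, hcy⟩)
        have hdisj : Disjoint ΔA Δs := by
          rw [Finset.disjoint_left]
          intro x hxA hxs
          exact (hΔsf x hxs).2.2 (Finset.mem_union_right _ hxA)
        refine ⟨kA + kB, ΔA ∪ Δs, ?_, ?_, ?_, ?_⟩
        · rw [Finset.card_union_of_disjoint hdisj]
          omega
        · intro x hx
          rcases Finset.mem_union.mp hx with h | h
          · exact ⟨Finset.mem_of_mem_erase (Finset.mem_sdiff.mp (hΔAf x h)).1,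
              (Finset.mem_erase.mp (Finset.mem_sdiff.mp (hΔAf x h)).1).1,
              (Finset.mem_sdiff.mp (hΔAf x h)).2⟩
          · exact ⟨(hΔsf x h).1, (hΔsf x h).2.1,
              fun hh => (hΔsf x h).2.2 (Finset.mem_union_left _ hh)⟩
        · intro x hx
          rcases Finset.mem_union.mp hx with h | h
          · rcases hΔAj x h with rfl | ⟨y, hy, hcy⟩
            · exact Or.inl hi
            · exact Or.inr ⟨y, Or.inr (Finset.mem_union_left _ hy), hcy⟩
          · rcases hΔsj x h with hc1 | ⟨y, hy, hcy⟩
            · exact Or.inl hc1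
            · rcases hy with hy | hy
              · rcases Finset.mem_union.mp hy with hy' | hy'
                · exact Or.inr ⟨y, Or.inl hy', hcy⟩
                · exact Or.inr ⟨y, Or.inr (Finset.mem_union_left _ hy'), hcy⟩
              · exact Or.inr ⟨y, Or.inr (Finset.mem_union_right _ hy), hcy⟩
        · intro f stk2 res1
          have hfe : f + (kA + kB) = (f + kB) + kA := by omega
          rw [List.map_cons, List.cons_append, hfe, heqA, heqB, hgoR]
          simp [List.append_assoc]
    have hl0nd : (((childrenOf g cur).filter (fun i => decide (i ≠ parent))).reverse).Nodup :=
      (List.nodup_reverse).mpr (filtered_nodup g h4 (hInv.2.1 cur hInv.1) hpar)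
    have hl0mem : ∀ i ∈ ((childrenOf g cur).filter (fun i => decide (i ≠ parent))).reverse,
        i ∈ pvChildren g cur := by
      intro i hi
      exact mem_pvChildren_of_filter g hpar (List.mem_reverse.mp hi)
    obtain ⟨kt, Δs, hkt, hΔf, hΔj, heq⟩ :=
      inner (((childrenOf g cur).filter (fun i => decide (i ≠ parent))).reverse) hl0nd hl0mem
        ∅ (by simp) (by simp)
    have hcurΔs : cur ∉ Δs := fun h => (hΔf cur h).2.1 rfl
    refine ⟨kt + 1, insert cur Δs, ?_, ?_, ?_, ?_⟩
    · rw [Finset.card_insert_of_notMem hcurΔs]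
      omega
    · intro x hx
      rcases Finset.mem_insert.mp hx with rfl | hm
      · exact hInv.1
      · exact (hΔf x hm).1
    · intro x hx
      rcases Finset.mem_insert.mp hx with rfl | hm
      · exact Or.inl rfl
      · rcases hΔj x hm with hc1 | ⟨y, hy, hcy⟩
        · exact Or.inr ⟨cur, Finset.mem_insert_self _ _, hc1⟩
        · rcases hy with hy | hy
          · simp at hy
          · exact Or.inr ⟨y, Finset.mem_insert.mpr (Or.inr hy), hcy⟩
    · intro f stk res
      have hfe : f + (kt + 1) = (f + kt) + 1 := by omega
      rw [hfe, dfsAltLoop_step g c (f + kt) cur parent S stk res (childrenOf g cur) col hcol hget,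
        heq, goR_pos g c fresh cur parent path col hInv.1 hcol]
      have hres0 : (if PySem.Set.contains S col then res else res ++ [cur + 1])
          = res ++ (if path.count col = 0 then [cur + 1] else []) := by
        by_cases hm : PySem.Set.contains S col
        · have hcolp : col ∈ path := (hS col).mp ((PySem.Set.contains_iff S col).mp hm)
          have : path.count col ≠ 0 := by
            rw [← List.count_pos_iff] at hcolp
            omega
          rw [if_pos hm, if_neg this]
          simp
        · have hcolp : col ∉ path := by
            intro hmem2
            exact hm ((PySem.Set.contains_iff S col).mpr ((hS col).mpr hmem2))
          have : path.count col = 0 := List.count_eq_zero.mpr hcolp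
          rw [if_neg hm, if_pos this]
      rw [hres0]
      simp [List.append_assoc]

-- ===== VERDICT (by name: the statement is the Claim_ definition above) =====
theorem dfs_spec : Claim_equal_dfs := by
  intro graph n c _ hpre
  unfold Spec_dfs
  obtain ⟨hC1, hC2, hC3, h4⟩ := hpre
  have hInv0 : TreeInv graph ((pvReach graph).toFinset) 0 := by
    refine ⟨List.mem_toFinset.mpr (reach_zero graph), ?_, ?_, ?_⟩
    · intro x hx
      exact List.mem_toFinset.mp hx
    · intro x hx y hy
      exact List.mem_toFinset.mpr (reach_closed graph hC1 x (List.mem_toFinset.mp hx) y hy)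
    · intro x hx hcon
      exact hC3 x (List.mem_toFinset.mp hx) hcon
  have hcardK : ((pvReach graph).toFinset).card ≤ graph.length := by
    have hsub : (pvReach graph).toFinset ⊆ (graph.map Prod.fst).toFinset := by
      intro x hx
      exact List.mem_toFinset.mpr (hC1 x (List.mem_toFinset.mp hx))
    have h1 := Finset.card_le_card hsub
    have h2 : (graph.map Prod.fst).toFinset.card ≤ graph.length := by
      have := List.toFinset_card_le (graph.map Prod.fst)
      simpa using this
    omega
  have hvis0 : ∀ x ∈ (pvReach graph).toFinset, x ∉ PySem.Set.empty := by
    intro x _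
    simp [PySem.Set.empty]
  have hd0 : ∀ x : Int, PySem.Dict.empty.getD x 0 = (([] : List Int).count x : Int) := by
    intro x
    simp [PySem.Dict.getD_empty]
  have hc0 : PySem.List.pyGet? c 0 ≠ none := hC2 0 (reach_zero graph)
  obtain ⟨visA, dA, ΔA, heqA, _, _, _, _⟩ :=
    simA graph c h4 hC1 hC2 hC3 ((pvReach graph).toFinset).card
      ((pvReach graph).toFinset) le_rfl 0 (-1) [] PySem.Set.empty PySem.Dict.empty [] []
      hInv0 hvis0 hd0 hc0 (fun _ => rfl)
  obtain ⟨k, ΔB, hkB, hΔBf, _, heqB⟩ :=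
    simB graph c h4 hC1 hC2 hC3 ((pvReach graph).toFinset).card
      ((pvReach graph).toFinset) le_rfl 0 (-1) PySem.Set.empty []
      hInv0 (by intro x; simp [PySem.Set.empty]) hc0 (fun _ => rfl)
  have hkle : k ≤ graph.length := by
    have : ΔB.card ≤ ((pvReach graph).toFinset).card := Finset.card_le_card (by
      intro x hx
      exact hΔBf x hx)
    omega
  have hfuelbig : graph.length <
      (graph.length + (graph.map (fun p => p.2.length)).sum + 2) ^ (graph.length + 2) := by
    have hbase : graph.length + (graph.map (fun p => p.2.length)).sum + 2
        ≤ (graph.length + (graph.map (fun p => p.2.length)).sum + 2) ^ (graph.length + 2) :=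
      Nat.le_self_pow (by omega) _
    omega
  have hfuel : (((graph.length + (graph.map (fun p => p.2.length)).sum + 2) ^ (graph.length + 2)) - k) + k
      = (graph.length + (graph.map (fun p => p.2.length)).sum + 2) ^ (graph.length + 2) := by
    omega
  have hB := heqB (((graph.length + (graph.map (fun p => p.2.length)).sum + 2) ^ (graph.length + 2)) - k) [] []
  rw [hfuel] at hB
  unfold dfs dfs_alt
  rw [heqA, dfsLoop_nil, hB, dfsAltLoop_nil]
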